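-- pv_equiv track=rewrite | github.com/SanglapD/Profanity-Compliance-Detector | pages/02_Q3_Visualizer.py | intersect_two_sets
-- ===== SOURCE A (Python) =====
-- from typing import List, Tuple, Dict
--
-- Interval = Tuple[int, int]
--
-- def merge_intervals(iv: List[Interval]) -> List[Interval]:
--     if not iv:
--         return []
--     iv = sorted(iv, key=lambda x: (x[0], x[1]))
--     out = [iv[0]]
--     for s, e in iv[1:]:
--         ps, pe = out[-1]
--         if s <= pe:
--             out[-1] = (ps, max(pe, e))
--         else:
--             out.append((s, e))
--     return out
--
-- def intersect_two_sets(a: List[Interval], b: List[Interval]) -> List[Interval]: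
--     a = merge_intervals(a)
--     b = merge_intervals(b)
--     i = j = 0
--     out = []
--     while i < len(a) and j < len(b):
--         s1, e1 = a[i]; s2, e2 = b[j]
--         s = max(s1, s2); e = min(e1, e2)
--         if s < e:
--             out.append((s, e))
--         if e1 <= e2:
--             i += 1
--         else:
--             j += 1
--     return out
-- ===== SOURCE B (Python) =====
-- def _merged(iv):
--     out = []
--     cur = None
--     for s, e in sorted(iv, key=lambda x: (x[0], x[1])):
--         if cur is None:
--             cur = (s, e)
--         elif s <= cur[1]:
--             cur = (cur[0], max(cur[1], e))
--         else:
--             out.append(cur)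
--             cur = (s, e)
--     if cur is not None:
--         out.append(cur)
--     return out
--
-- def intersect_two_sets(a, b):
--     A = _merged(a)
--     B = _merged(b)
--     return [(max(s1, s2), min(e1, e2))
--             for (s1, e1) in A
--             for (s2, e2) in B
--             if max(s1, s2) < min(e1, e2)]
-- ===== Notes on version B (the rewrite author's own statement) =====
-- stated objective: alternative
-- what changed: Merging is done with a current-run accumulator flushed on gaps instead of mutating the output list's last element, and the intersection is a nested pair comprehension over the two merged lists instead of a two-pointer while loop.
import Mathlib
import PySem

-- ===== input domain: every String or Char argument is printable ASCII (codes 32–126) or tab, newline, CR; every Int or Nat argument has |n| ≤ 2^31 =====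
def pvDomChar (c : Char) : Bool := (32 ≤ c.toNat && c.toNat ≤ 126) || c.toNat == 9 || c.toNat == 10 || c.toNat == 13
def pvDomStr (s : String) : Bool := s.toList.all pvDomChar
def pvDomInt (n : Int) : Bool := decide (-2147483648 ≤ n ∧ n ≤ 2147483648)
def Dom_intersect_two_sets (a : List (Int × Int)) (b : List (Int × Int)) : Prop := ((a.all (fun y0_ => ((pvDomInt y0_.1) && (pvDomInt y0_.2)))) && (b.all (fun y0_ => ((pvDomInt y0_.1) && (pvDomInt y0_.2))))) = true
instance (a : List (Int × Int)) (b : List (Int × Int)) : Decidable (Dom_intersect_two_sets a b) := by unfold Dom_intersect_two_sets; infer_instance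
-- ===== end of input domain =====

-- B replaces A's merge-then-two-pointer intersection by a current-run merge fold plus a nested
-- pair comprehension over the two merged lists (alternative decomposition, not claimed faster).


-- ===== PORT A =====
-- merge_intervals: sort by (s, e), start out = [iv[0]], then mutate out's last or append
def pvMergeA (iv : List (Int × Int)) : List (Int × Int) :=
  match PySem.List.sorted2 iv (fun x => x.1) (fun x => x.2) with
  | [] => []
  | h :: t =>
    t.foldl (fun out se =>
      let ps := (out.getLastD (0, 0)).1
      let pe := (out.getLastD (0, 0)).2
      if se.1 ≤ pe then out.dropLast ++ [(ps, max pe se.2)] else out ++ [se]) [h]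

-- the while-loop over indices i, j, transcribed as recursion on the two suffixes
def pvLoopA : List (Int × Int) → List (Int × Int) → List (Int × Int)
  | [], _ => []
  | _ :: _, [] => []
  | (s1, e1) :: ta, (s2, e2) :: tb =>
    let s := max s1 s2
    let e := min e1 e2
    let emit := if s < e then [(s, e)] else []
    if e1 ≤ e2 then emit ++ pvLoopA ta ((s2, e2) :: tb)
    else emit ++ pvLoopA ((s1, e1) :: ta) tb
termination_by a b => a.length + b.length

def intersect_two_sets (a : List (Int × Int)) (b : List (Int × Int)) : List (Int × Int) :=
  pvLoopA (pvMergeA a) (pvMergeA b)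

-- ===== PORT B =====
-- _merged: fold carrying the current run (out, cur), flushed on a gap and at the end
def pvChainStep (st : List (Int × Int) × Option (Int × Int)) (se : Int × Int) :
    List (Int × Int) × Option (Int × Int) :=
  match st.2 with
  | none => (st.1, some se)
  | some cur =>
    if se.1 ≤ cur.2 then (st.1, some (cur.1, max cur.2 se.2))
    else (st.1 ++ [cur], some se)

def pvMergeB (iv : List (Int × Int)) : List (Int × Int) :=
  let st := (PySem.List.sorted2 iv (fun x => x.1) (fun x => x.2)).foldl pvChainStep ([], none)
  match st.2 with
  | none => st.1
  | some cur => st.1 ++ [cur]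

-- the nested comprehension over the two merged lists
def pvRow (x : Int × Int) (bs : List (Int × Int)) : List (Int × Int) :=
  (bs.filter (fun y => decide (max x.1 y.1 < min x.2 y.2))).map (fun y => (max x.1 y.1, min x.2 y.2))

def intersect_two_sets_alt (a : List (Int × Int)) (b : List (Int × Int)) : List (Int × Int) :=
  (pvMergeB a).flatMap (fun x => pvRow x (pvMergeB b))

-- ===== PRECONDITION & SPEC =====
def Spec_intersect_two_sets (a : List (Int × Int)) (b : List (Int × Int)) (out : List (Int × Int)) : Prop := out = intersect_two_sets_alt a b
instance (a : List (Int × Int)) (b : List (Int × Int)) (out : List (Int × Int)) : Decidable (Spec_intersect_two_sets a b out) := by unfold Spec_intersect_two_sets; infer_instance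

-- ===== CLAIM (what is proved, stated in full; the proofs are below) =====
def Claim_equal_intersect_two_sets : Prop := ∀ (a : List (Int × Int)) (b : List (Int × Int)), Dom_intersect_two_sets a b → Spec_intersect_two_sets a b (intersect_two_sets a b)

-- ===== LEMMAS AND PROOFS =====

-- lexicographic ≤ on pairs, the order sorted2's comparator realises
def pvLexLe (x y : Int × Int) : Prop := x.1 < y.1 ∨ (x.1 = y.1 ∧ x.2 ≤ y.2)

def pvBefore (x y : Int × Int) : Bool :=
  decide (x.1 < y.1) || (!decide (y.1 < x.1) && decide (x.2 < y.2))

theorem pvLexLe_trans {x y z : Int × Int} (h1 : pvLexLe x y) (h2 : pvLexLe y z) : pvLexLe x z := by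
  unfold pvLexLe at *; omega

theorem pvBefore_true {x y : Int × Int} (h : pvBefore x y = true) : pvLexLe x y := by
  unfold pvBefore at h; unfold pvLexLe; simp at h; omega

theorem pvBefore_false {x y : Int × Int} (h : pvBefore x y = false) : pvLexLe y x := by
  unfold pvBefore at h; unfold pvLexLe; simp at h; omega

theorem insertBy_eq_nil (x : Int × Int) : PySem.List.insertBy pvBefore x [] = [x] := rfl

theorem insertBy_eq_cons (x y : Int × Int) (ys : List (Int × Int)) :
    PySem.List.insertBy pvBefore x (y :: ys) =
      if pvBefore x y then x :: y :: ys else y :: PySem.List.insertBy pvBefore x ys := rfl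

theorem pairwise_insertBy (x : Int × Int) (l : List (Int × Int))
    (h : l.Pairwise pvLexLe) : (PySem.List.insertBy pvBefore x l).Pairwise pvLexLe := by
  induction l with
  | nil => simp [insertBy_eq_nil]
  | cons y ys ih =>
    rw [insertBy_eq_cons]
    rcases List.pairwise_cons.mp h with ⟨hy, hys⟩
    by_cases hb : pvBefore x y = true
    · rw [if_pos hb]
      have hxy := pvBefore_true hb
      refine List.pairwise_cons.mpr ⟨?_, h⟩
      intro z hz
      rcases List.mem_cons.mp hz with rfl | hz'
      · exact hxy
      · exact pvLexLe_trans hxy (hy z hz')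
    · rw [if_neg hb]
      refine List.pairwise_cons.mpr ⟨?_, ih hys⟩
      intro z hz
      rcases (PySem.List.mem_insertBy _ _ _ _).mp hz with rfl | hz'
      · exact pvBefore_false (by simpa using hb)
      · exact hy z hz'

theorem pairwise_foldl_insertBy (xs : List (Int × Int)) (acc : List (Int × Int))
    (h : acc.Pairwise pvLexLe) :
    (xs.foldl (fun acc x => PySem.List.insertBy pvBefore x acc) acc).Pairwise pvLexLe := by
  induction xs generalizing acc with
  | nil => simpa
  | cons x xs ih => exact ih _ (pairwise_insertBy x acc h)

theorem sorted2_pairwise_lexLe (iv : List (Int × Int)) :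
    (PySem.List.sorted2 iv (fun x => x.1) (fun x => x.2)).Pairwise pvLexLe := by
  have : PySem.List.sorted2 iv (fun x => x.1) (fun x => x.2) =
      iv.foldl (fun acc x => PySem.List.insertBy pvBefore x acc) [] := rfl
  rw [this]
  exact pairwise_foldl_insertBy iv [] (by simp)

-- ---- merge equivalence: A's mutate-last fold = B's current-run fold ----

def pvStepA (out : List (Int × Int)) (se : Int × Int) : List (Int × Int) :=
  let ps := (out.getLastD (0, 0)).1
  let pe := (out.getLastD (0, 0)).2
  if se.1 ≤ pe then out.dropLast ++ [(ps, max pe se.2)] else out ++ [se]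

def pvFlush (st : List (Int × Int) × Option (Int × Int)) : List (Int × Int) :=
  match st.2 with
  | none => st.1
  | some cur => st.1 ++ [cur]

theorem foldlA_eq_foldlB (t : List (Int × Int)) :
    ∀ (front : List (Int × Int)) (cur : Int × Int),
    t.foldl pvStepA (front ++ [cur]) = pvFlush (t.foldl pvChainStep (front, some cur)) := by
  induction t with
  | nil => intro front cur; simp [pvFlush]
  | cons se t ih =>
    intro front cur
    simp only [List.foldl_cons]
    by_cases hb : se.1 ≤ cur.2
    · have hA : pvStepA (front ++ [cur]) se = front ++ [(cur.1, max cur.2 se.2)] := by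
        simp [pvStepA, hb]
      have hB : pvChainStep (front, some cur) se = (front, some (cur.1, max cur.2 se.2)) := by
        simp [pvChainStep, hb]
      rw [hA, hB, ih]
    · have hA : pvStepA (front ++ [cur]) se = (front ++ [cur]) ++ [se] := by
        simp [pvStepA, hb]
      have hB : pvChainStep (front, some cur) se = (front ++ [cur], some se) := by
        simp [pvChainStep, hb]
      rw [hA, hB, ih]

theorem mergeA_eq_mergeB (iv : List (Int × Int)) : pvMergeA iv = pvMergeB iv := by
  unfold pvMergeA pvMergeB
  cases hs : PySem.List.sorted2 iv (fun x => x.1) (fun x => x.2) with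
  | nil => simp
  | cons h t =>
    simp only [List.foldl_cons]
    have hstep : pvChainStep ([], none) h = ([], some h) := rfl
    rw [hstep]
    have := foldlA_eq_foldlB t [] h
    simp only [List.nil_append] at this
    have hfold : t.foldl (fun out se =>
        let ps := (out.getLastD (0, 0)).1
        let pe := (out.getLastD (0, 0)).2
        if se.1 ≤ pe then out.dropLast ++ [(ps, max pe se.2)] else out ++ [se]) [h] =
        t.foldl pvStepA [h] := rfl
    rw [hfold, this]
    rfl

-- ---- the gap invariant of a merged list ----

def pvGap (x y : Int × Int) : Prop := x.2 < y.1

theorem gap_fold (l : List (Int × Int)) :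
    ∀ (out : List (Int × Int)) (cur : Int × Int),
    (out ++ [cur]).Pairwise pvGap →
    l.Pairwise (fun x y => x.1 ≤ y.1) →
    (∀ z ∈ l, cur.1 ≤ z.1) →
    (pvFlush (l.foldl pvChainStep (out, some cur))).Pairwise pvGap := by
  induction l with
  | nil => intro out cur h _ _; simpa [pvFlush]
  | cons se t ih =>
    intro out cur hgap hmono hcur
    rcases List.pairwise_cons.mp hmono with ⟨hse, hmt⟩
    have hcs : cur.1 ≤ se.1 := hcur se (by simp)
    simp only [List.foldl_cons]
    by_cases hb : se.1 ≤ cur.2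
    · have hB : pvChainStep (out, some cur) se = (out, some (cur.1, max cur.2 se.2)) := by
        simp [pvChainStep, hb]
      rw [hB]
      apply ih
      · rcases List.pairwise_append.mp hgap with ⟨h1, _, h3⟩
        refine List.pairwise_append.mpr ⟨h1, by simp, ?_⟩
        intro x hx y hy
        simp at hy; subst hy
        exact h3 x hx cur (by simp)
      · exact hmt
      · intro z hz; exact le_trans hcs (hse z hz)
    · have hB : pvChainStep (out, some cur) se = (out ++ [cur], some se) := by
        simp [pvChainStep, hb]
      rw [hB]
      apply ih
      · refine List.pairwise_append.mpr ⟨hgap, by simp, ?_⟩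
        intro x hx y hy
        simp at hy; subst hy
        rcases List.mem_append.mp hx with hx' | hx'
        · rcases List.pairwise_append.mp hgap with ⟨_, _, h3⟩
          have := h3 x hx' cur (by simp)
          unfold pvGap at *; omega
        · simp at hx'; subst hx'
          unfold pvGap; omega
      · exact hmt
      · intro z hz; exact hse z hz
  
theorem mergeB_gap (iv : List (Int × Int)) : (pvMergeB iv).Pairwise pvGap := by
  unfold pvMergeB
  have hp : (PySem.List.sorted2 iv (fun x => x.1) (fun x => x.2)).Pairwise
      (fun x y : Int × Int => x.1 ≤ y.1) := by
    refine (sorted2_pairwise_lexLe iv).imp ?_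
    intro x y h; unfold pvLexLe at h; omega
  cases hs : PySem.List.sorted2 iv (fun x => x.1) (fun x => x.2) with
  | nil => simp
  | cons h t =>
    rw [hs] at hp
    rcases List.pairwise_cons.mp hp with ⟨hh, ht⟩
    simp only [List.foldl_cons]
    have hstep : pvChainStep ([], none) h = ([], some h) := rfl
    rw [hstep]
    have := gap_fold t [] h (by simp) ht hh
    simpa [pvFlush] using this

-- ---- two-pointer loop = nested comprehension, on gap-chained lists ----

theorem pvRow_nil (x : Int × Int) : pvRow x [] = [] := rfl

theorem pvRow_cons (x y : Int × Int) (bs : List (Int × Int)) :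
    pvRow x (y :: bs) =
      (if max x.1 y.1 < min x.2 y.2 then [(max x.1 y.1, min x.2 y.2)] else []) ++ pvRow x bs := by
  unfold pvRow
  rw [List.filter_cons]
  by_cases h : max x.1 y.1 < min x.2 y.2 <;>
    simp only [h, decide_true, decide_false, if_true, if_false, List.map_cons,
      List.singleton_append, List.nil_append, Bool.false_eq_true]

theorem pvRow_drop (x y : Int × Int) (bs : List (Int × Int)) (h : ¬ max x.1 y.1 < min x.2 y.2) :
    pvRow x (y :: bs) = pvRow x bs := by
  rw [pvRow_cons]; simp [h]

theorem pvRow_nil_of_gap (x y : Int × Int) (tb : List (Int × Int)) (hle : x.2 ≤ y.2)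
    (hgap : ∀ z ∈ tb, y.2 < z.1) : pvRow x tb = [] := by
  induction tb with
  | nil => rfl
  | cons z t iht =>
    have hz := hgap z (by simp)
    rw [pvRow_drop _ _ _ (by simp; intro _; omega)]
    exact iht (fun w hw => hgap w (by simp [hw]))

theorem flatMap_row_congr (as : List (Int × Int)) (f g : (Int × Int) → List (Int × Int))
    (h : ∀ x ∈ as, f x = g x) : as.flatMap f = as.flatMap g := by
  induction as with
  | nil => rfl
  | cons a t ih =>
    simp only [List.flatMap_cons]
    rw [h a (by simp), ih (fun x hx => h x (by simp [hx]))]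

theorem loop_eq_nested (n : Nat) :
    ∀ (A B : List (Int × Int)), A.length + B.length ≤ n →
    A.Pairwise pvGap → B.Pairwise pvGap →
    pvLoopA A B = A.flatMap (fun x => pvRow x B) := by
  induction n with
  | zero =>
    intro A B hlen _ _
    have : A = [] := by cases A <;> simp_all
    subst this; simp [pvLoopA]
  | succ n ih =>
    intro A B hlen hA hB
    match A, B with
    | [], B => simp [pvLoopA]
    | (s1, e1) :: ta, [] =>
      simp [pvLoopA, pvRow_nil]
    | (s1, e1) :: ta, (s2, e2) :: tb =>
      rcases List.pairwise_cons.mp hA with ⟨hAh, hAt⟩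
      rcases List.pairwise_cons.mp hB with ⟨hBh, hBt⟩
      simp only [List.length_cons] at hlen
      by_cases hc : e1 ≤ e2
      · have hloop : pvLoopA ((s1, e1) :: ta) ((s2, e2) :: tb) =
            (if max s1 s2 < min e1 e2 then [(max s1 s2, min e1 e2)] else []) ++
              pvLoopA ta ((s2, e2) :: tb) := by
          rw [pvLoopA]; simp [hc]
        rw [hloop, ih ta ((s2, e2) :: tb) (by simp; omega) hAt hB]
        have hrow : pvRow (s1, e1) ((s2, e2) :: tb) =
            (if max s1 s2 < min e1 e2 then [(max s1 s2, min e1 e2)] else []) := by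
          rw [pvRow_cons]
          have : pvRow (s1, e1) tb = [] :=
            pvRow_nil_of_gap (s1, e1) (s2, e2) tb (by simpa using hc)
              (fun z hz => hBh z hz)
          simp [this]
        simp [List.flatMap_cons, hrow]
      · have hloop : pvLoopA ((s1, e1) :: ta) ((s2, e2) :: tb) =
            (if max s1 s2 < min e1 e2 then [(max s1 s2, min e1 e2)] else []) ++
              pvLoopA ((s1, e1) :: ta) tb := by
          rw [pvLoopA]; simp [hc]
        rw [hloop, ih ((s1, e1) :: ta) tb (by simp; omega) hA hBt]
        simp only [List.flatMap_cons]
        rw [pvRow_cons]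
        have hdrop : ta.flatMap (fun x => pvRow x ((s2, e2) :: tb)) =
            ta.flatMap (fun x => pvRow x tb) := by
          apply flatMap_row_congr
          intro x hx
          have hgap := hAh x hx
          unfold pvGap at hgap
          apply pvRow_drop
          simp; intro _; omega
        rw [hdrop]
        simp
theorem intersect_two_sets_spec0 (a b : List (Int × Int)) :
    intersect_two_sets a b = intersect_two_sets_alt a b := by
  unfold intersect_two_sets intersect_two_sets_alt
  rw [mergeA_eq_mergeB, mergeA_eq_mergeB]
  exact loop_eq_nested ((pvMergeB a).length + (pvMergeB b).length) _ _ le_rfl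
    (mergeB_gap a) (mergeB_gap b)

-- ===== VERDICT (by name: the statement is the Claim_ definition above) =====
theorem intersect_two_sets_spec : Claim_equal_intersect_two_sets := by
  intro a b _
  unfold Spec_intersect_two_sets
  exact intersect_two_sets_spec0 a b
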